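-- pv_equiv track=rewrite | github.com/tech-magic/biomed-simplify | agentic_ai/tasks/mindmap_generator_task.py | passes_static_validations
-- ===== SOURCE A (Python) =====
-- def passes_static_validations(mindmap_code) -> tuple[bool, str]:
--
--     # Static validation
--     lines = mindmap_code.strip().splitlines()
--
--     # Ensure code starts with 'mindmap'
--     if not lines or lines[0].strip() != "mindmap":
--         return False, "Missing 'mindmap' as the first line"
--
--     # Ensure a root node exists
--     if not any("root((" in line for line in lines):
--         return False, "Missing root node with syntax like 'root((Main Topic))'"
--
--     # Ensure no forbidden characters
--     if any("```" in line or "[" in line or "]" in line for line in lines):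
--         return False, "Contains invalid syntax (e.g., triple backticks or square brackets)"
--
--     # Ensure no line has trailing or non-tab leading spaces
--     for i, line in enumerate(lines):
--         stripped = line.lstrip('\t')  # Remove leading tabs
--         if stripped != stripped.strip():
--             return False, f"Line {i+1} has invalid leading/trailing spaces (only tabs allowed for indentation)"
--
--     return True, "Valid mindmap syntax"
-- ===== SOURCE B (Python) =====
-- def passes_static_validations(mindmap_code) -> tuple[bool, str]:
--     lines = mindmap_code.strip().splitlines()
--
--     if not lines or lines[0].strip() != "mindmap":
--         return False, "Missing 'mindmap' as the first line"
--
--     # Single pass over all lines, gathering the three facts A checks in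
--     # three separate traversals.
--     has_root = False
--     has_forbidden = False
--     first_bad = -1
--     for i, line in enumerate(lines):
--         if "root((" in line:
--             has_root = True
--         if "```" in line or "[" in line or "]" in line:
--             has_forbidden = True
--         if first_bad < 0:
--             stripped = line.lstrip('\t')
--             if stripped != stripped.strip():
--                 first_bad = i
--
--     if not has_root:
--         return False, "Missing root node with syntax like 'root((Main Topic))'"
--     if has_forbidden:
--         return False, "Contains invalid syntax (e.g., triple backticks or square brackets)"
--     if first_bad >= 0:
--         return False, f"Line {first_bad + 1} has invalid leading/trailing spaces (only tabs allowed for indentation)"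
--     return True, "Valid mindmap syntax"
-- ===== Notes on version B (the rewrite author's own statement) =====
-- stated objective: alternative
-- what changed: Replaces A's three separate traversals (two any() scans plus an early-return for loop) by one single pass that accumulates has_root, has_forbidden and the first whitespace-bad line index, then emits the errors in A's priority order after the loop.
import Mathlib
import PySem

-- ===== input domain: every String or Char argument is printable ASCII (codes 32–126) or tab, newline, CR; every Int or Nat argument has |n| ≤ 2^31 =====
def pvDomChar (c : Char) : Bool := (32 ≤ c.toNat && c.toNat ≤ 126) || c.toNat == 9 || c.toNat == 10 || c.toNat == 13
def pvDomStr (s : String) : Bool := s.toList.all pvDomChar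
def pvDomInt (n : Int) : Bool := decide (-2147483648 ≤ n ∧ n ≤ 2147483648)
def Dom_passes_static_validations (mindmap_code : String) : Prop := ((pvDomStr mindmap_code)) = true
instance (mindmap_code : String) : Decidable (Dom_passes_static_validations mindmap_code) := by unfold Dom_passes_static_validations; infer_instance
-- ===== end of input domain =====

-- B merges A's three traversals (two any() scans and an early-return loop) into one
-- accumulating pass; the error priority order is reproduced after the loop (alternative).

-- shared message literals (identical strings in both Pythons)
def pvMsgFirst : String := "Missing 'mindmap' as the first line"
def pvMsgRoot : String := "Missing root node with syntax like 'root((Main Topic))'"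
def pvMsgForbidden : String := "Contains invalid syntax (e.g., triple backticks or square brackets)"
def pvMsgWs : String := " has invalid leading/trailing spaces (only tabs allowed for indentation)"
def pvMsgValid : String := "Valid mindmap syntax"

-- line.lstrip('\t'): drop leading tabs only (exact: the char set is the single char '\t')
def pvLstripTabs (l : List Char) : List Char := l.dropWhile (· == '\t')

-- 'root((' in line
def pvHasRoot (l : List Char) : Bool := PySem.Chars.isIn "root((".toList l
-- '```' in line or '[' in line or ']' in line
def pvHasForbidden (l : List Char) : Bool :=
  PySem.Chars.isIn "```".toList l || PySem.Chars.isIn "[".toList l || PySem.Chars.isIn "]".toList l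

-- ===== PORT A =====
-- the for-loop over enumerate(lines) with early return
def pvALoop : List (List Char) → Nat → Bool × String
  | [], _ => (true, pvMsgValid)
  | l :: rest, i =>
      let stripped := pvLstripTabs l
      if stripped ≠ PySem.Chars.strip stripped then
        (false, "Line " ++ PySem.Int.toStr ((i : Int) + 1) ++ pvMsgWs)
      else pvALoop rest (i + 1)

def passes_static_validations (mindmap_code : String) : Bool × String :=
  -- lines = mindmap_code.strip().splitlines()
  match PySem.Chars.splitlines (PySem.Chars.strip mindmap_code.toList) with
  | [] => (false, pvMsgFirst)
  | l0 :: rest =>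
      if PySem.Chars.strip l0 ≠ "mindmap".toList then (false, pvMsgFirst)
      else if ¬ (l0 :: rest).any pvHasRoot then (false, pvMsgRoot)
      else if (l0 :: rest).any pvHasForbidden then (false, pvMsgForbidden)
      else pvALoop (l0 :: rest) 0

-- ===== PORT B =====
-- the single accumulating pass of Source B: for i, line in enumerate(lines): update the three facts
def pvBScan : List (List Char) → Nat → Bool → Bool → Int → Bool × Bool × Int
  | [], _, hasRoot, hasForb, firstBad => (hasRoot, hasForb, firstBad)
  | l :: rest, i, hasRoot, hasForb, firstBad =>
      let hasRoot' := if pvHasRoot l then true else hasRoot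
      let hasForb' := if pvHasForbidden l then true else hasForb
      let firstBad' :=
        if firstBad < 0 then
          let stripped := pvLstripTabs l
          if stripped ≠ PySem.Chars.strip stripped then (i : Int) else firstBad
        else firstBad
      pvBScan rest (i + 1) hasRoot' hasForb' firstBad'

def passes_static_validations_alt (mindmap_code : String) : Bool × String :=
  -- lines = mindmap_code.strip().splitlines()
  match PySem.Chars.splitlines (PySem.Chars.strip mindmap_code.toList) with
  | [] => (false, pvMsgFirst)
  | l0 :: rest =>
      if PySem.Chars.strip l0 ≠ "mindmap".toList then (false, pvMsgFirst)
      else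
        match pvBScan (l0 :: rest) 0 false false (-1) with
        | (hasRoot, hasForb, firstBad) =>
          if ¬ hasRoot then (false, pvMsgRoot)
          else if hasForb then (false, pvMsgForbidden)
          else if 0 ≤ firstBad then (false, "Line " ++ PySem.Int.toStr (firstBad + 1) ++ pvMsgWs)
          else (true, pvMsgValid)

-- ===== PRECONDITION & SPEC =====
def Spec_passes_static_validations (mindmap_code : String) (out : Bool × String) : Prop := out = passes_static_validations_alt mindmap_code
instance (mindmap_code : String) (out : Bool × String) : Decidable (Spec_passes_static_validations mindmap_code out) := by unfold Spec_passes_static_validations; infer_instance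

-- ===== CLAIM (what is proved, stated in full; the proofs are below) =====
def Claim_equal_passes_static_validations : Prop := ∀ (mindmap_code : String), Dom_passes_static_validations mindmap_code → Spec_passes_static_validations mindmap_code (passes_static_validations mindmap_code)

-- ===== LEMMAS AND PROOFS =====

-- the "bad line" test both programs use
def pvBad (l : List Char) : Bool := decide (pvLstripTabs l ≠ PySem.Chars.strip (pvLstripTabs l))

-- characterisation of B's scan
lemma pvBScan_spec (ls : List (List Char)) (i : Nat) (a b : Bool) (c : Int) :
    pvBScan ls i a b c =
      (a || ls.any pvHasRoot, b || ls.any pvHasForbidden,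
        if 0 ≤ c then c
        else match ls.findIdx? pvBad with
             | none => c
             | some j => ((i + j : Nat) : Int)) := by
  induction ls generalizing i a b c with
  | nil => simp [pvBScan]
  | cons l rest ih =>
      simp only [pvBScan, List.any_cons, List.findIdx?_cons]
      rw [ih]
      simp only [Prod.mk.injEq]
      refine ⟨?_, ?_, ?_⟩
      · cases a <;> cases pvHasRoot l <;> simp
      · cases b <;> cases pvHasForbidden l <;> simp
      · by_cases hb : pvLstripTabs l ≠ PySem.Chars.strip (pvLstripTabs l)
        · have hb2 : pvBad l = true := by simp [pvBad, hb]
          simp only [if_true, hb2]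
          split_ifs <;> simp_all <;> omega
        · have hb2 : pvBad l = false := by simp only [pvBad, decide_eq_false hb]
          simp only [hb, if_false, hb2]
          cases hj : rest.findIdx? pvBad <;> split_ifs <;> simp_all <;> omega

-- characterisation of A's loop
lemma pvALoop_spec (ls : List (List Char)) (i : Nat) :
    pvALoop ls i =
      match ls.findIdx? pvBad with
      | none => (true, pvMsgValid)
      | some j => (false, "Line " ++ PySem.Int.toStr (((i + j : Nat) : Int) + 1) ++ pvMsgWs) := by
  induction ls generalizing i with
  | nil => simp [pvALoop]
  | cons l rest ih =>
      simp only [pvALoop, List.findIdx?_cons]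
      by_cases hb : pvLstripTabs l ≠ PySem.Chars.strip (pvLstripTabs l)
      · have hb2 : pvBad l = true := by simp [pvBad, hb]
        simp [hb, hb2]
      · have hb2 : pvBad l = false := by simp only [pvBad, decide_eq_false hb]
        simp only [hb, if_false, hb2, Bool.false_eq_true]
        rw [ih]
        cases hj : rest.findIdx? pvBad with
        | none => simp
        | some j =>
            simp only [Option.map_some]
            have h : (i + 1) + j = i + (j + 1) := by omega
            rw [h]

-- ===== VERDICT (by name: the statement is the Claim_ definition above) =====
theorem passes_static_validations_spec : Claim_equal_passes_static_validations := by
  intro s _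
  unfold Spec_passes_static_validations passes_static_validations passes_static_validations_alt
  cases hls : PySem.Chars.splitlines (PySem.Chars.strip s.toList) with
  | nil => rfl
  | cons l0 rest =>
      by_cases h0 : PySem.Chars.strip l0 = "mindmap".toList
      · have e : (PySem.Chars.strip l0 ≠ "mindmap".toList) = False :=
          eq_false (not_not_intro h0)
        simp only [e, if_false]
        rw [pvBScan_spec, pvALoop_spec]
        by_cases hr : (l0 :: rest).any pvHasRoot
        · by_cases hf : (l0 :: rest).any pvHasForbidden
          · simp [hr, hf]
          · cases hj : ((l0 :: rest).findIdx? pvBad) with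
            | none => simp [hr, hf]
            | some j => simp [hr, hf]
        · simp [hr]
      · have e : (PySem.Chars.strip l0 ≠ "mindmap".toList) = True :=
          eq_true h0
        simp only [e, if_true]
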